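-- pv_equiv track=rewrite | github.com/shramkoartem/Project-Euler | Python/145.py | reversible
-- ===== SOURCE A (Python) =====
-- def reversible(n):
--     d = str(n)
--     if int(d[-1]) == 0:
--         return False
--     rd  = d[::-1]
--     s = int(d) + int(rd)
--     odd = [True if int(i)%2 == 0  else False for i in str(s)]
--     if any(odd):
--         return False
--     return True
-- ===== SOURCE B (Python) =====
-- def reversible(n):
--     # Arithmetic last-digit guard, then one arithmetic digit scan of the sum
--     # (no re-stringify, no intermediate list, early exit on the first even digit).
--     if n % 10 == 0:
--         return False
--     d = str(n)
--     s = int(d) + int(d[::-1])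
--     while True:
--         s, r = divmod(s, 10)
--         if r % 2 == 0:
--             return False
--         if s == 0:
--             return True
-- ===== Notes on version B (the rewrite author's own statement) =====
-- stated objective: alternative
-- what changed: B replaces A's string pipeline for the checks with arithmetic: the trailing-zero guard becomes n % 10 == 0 and the all-digits-odd test on the sum becomes a divmod loop with early exit instead of re-stringifying the sum and scanning a comprehension-built list with any().
import Mathlib
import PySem

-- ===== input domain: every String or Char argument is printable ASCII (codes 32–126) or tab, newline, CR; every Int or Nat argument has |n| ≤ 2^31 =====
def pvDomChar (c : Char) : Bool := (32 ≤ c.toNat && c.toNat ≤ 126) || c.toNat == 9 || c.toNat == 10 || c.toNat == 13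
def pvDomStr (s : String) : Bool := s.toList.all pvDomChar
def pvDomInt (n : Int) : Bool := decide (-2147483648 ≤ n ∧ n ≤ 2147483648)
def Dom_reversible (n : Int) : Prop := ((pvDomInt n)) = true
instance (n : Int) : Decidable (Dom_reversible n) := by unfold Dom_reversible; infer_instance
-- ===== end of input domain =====

-- B replaces A's string pipeline for the two checks by arithmetic (guard n % 10 == 0; divmod
-- digit scan of the sum with early exit) — an alternative decomposition, same asymptotic cost.

-- ===== PORT A =====
def reversible (n : Int) : Bool :=
  let d := PySem.Int.toChars n                               -- d = str(n)
  match PySem.List.pyGet? d (-1) with                        -- d[-1]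
  | none => false                                            -- IndexError (unreachable: str(n) is nonempty)
  | some lc =>
    match PySem.Int.ofChars? [lc] with                       -- int(d[-1])
    | none => false                                          -- ValueError (unreachable: last char of str(n) is a digit)
    | some g =>
      if g == 0 then false                                   -- if int(d[-1]) == 0: return False
      else
        let rd := (PySem.List.slice? d none none (-1)).getD []   -- rd = d[::-1] (step -1 never errors)
        match PySem.Int.ofChars? d, PySem.Int.ofChars? rd with   -- int(d), int(rd)
        | some a, some b =>                                  -- none = ValueError (excluded by Pre_)
          let s := a + b                                     -- s = int(d) + int(rd)
          let odd := (PySem.Int.toChars s).map               -- [True if int(i)%2 == 0 else False for i in str(s)]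
            (fun i => if PySem.Int.mod ((PySem.Int.ofChars? [i]).getD 0) 2 == 0 then true else false)
          if odd.any id then false else true                 -- if any(odd): return False / return True
        | _, _ => false

-- ===== PORT B =====
-- while True: s, r = divmod(s, 10); if r % 2 == 0: return False; if s == 0: return True
-- (the fuel only makes the loop total; with fuel = natAbs s + 1 and 0 ≤ s it is never exhausted)
def altDigitsLoop : Nat → Int → Bool
  | 0, _ => false
  | fuel + 1, s =>
    let q := PySem.Int.floordiv s 10                         -- s, r = divmod(s, 10)
    let r := PySem.Int.mod s 10
    if PySem.Int.mod r 2 == 0 then false                     -- if r % 2 == 0: return False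
    else if q == 0 then true                                 -- if s == 0: return True
    else altDigitsLoop fuel q

def reversible_alt (n : Int) : Bool :=
  if PySem.Int.mod n 10 == 0 then false                      -- if n % 10 == 0: return False
  else
    let d := PySem.Int.toChars n                             -- d = str(n)
    match PySem.Int.ofChars? d with                          -- int(d)
    | none => false                                          -- ValueError (unreachable: str(n) with n >= 0 is all digits)
    | some a =>
      match PySem.Int.ofChars? ((PySem.List.slice? d none none (-1)).getD []) with   -- int(d[::-1])
      | none => false                                        -- ValueError (excluded by Pre_)
      | some b => altDigitsLoop ((a + b).natAbs + 1) (a + b)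

-- ===== PRECONDITION & SPEC =====
-- Pre_ excludes exactly the inputs where A raises: for n < 0 with last digit nonzero,
-- int(d[::-1]) raises ValueError (the reversed string ends in '-'); A returns on every other int.
def Pre_reversible (n : Int) : Prop := 0 ≤ n ∨ (10 : Int) ∣ n
instance (n : Int) : Decidable (Pre_reversible n) := by unfold Pre_reversible; infer_instance
def pvWitness_reversible : Int := 56

def Spec_reversible (n : Int) (out : Bool) : Prop := out = reversible_alt n
instance (n : Int) (out : Bool) : Decidable (Spec_reversible n out) := by unfold Spec_reversible; infer_instance

-- ===== CLAIM (what is proved, stated in full; the proofs are below) =====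
def Claim_equal_reversible : Prop := ∀ (n : Int), Dom_reversible n → Pre_reversible n → Spec_reversible n (reversible n)

-- ===== LEMMAS AND PROOFS =====

-- ---- facts about str(n) = Nat.toDigits ----
theorem toDigits_getLast? (m : Nat) :
    (Nat.toDigits 10 m).getLast? = some (Nat.digitChar (m % 10)) := by
  rcases Nat.lt_or_ge m 10 with h | h
  · rw [Nat.toDigits_of_lt_base h, Nat.mod_eq_of_lt h]; rfl
  · rw [Nat.toDigits_eq_if (by norm_num), if_neg (by omega)]
    simp

theorem toDigits_all_isDigit (m : Nat) : ∀ c ∈ Nat.toDigits 10 m, c.isDigit = true :=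
  fun _ hc => Nat.isDigit_of_mem_toDigits (by norm_num) (by norm_num) hc

theorem toChars_getLast? (n : Int) :
    (PySem.Int.toChars n).getLast? = some (Nat.digitChar (n.natAbs % 10)) := by
  unfold PySem.Int.toChars
  split
  · rename_i hneg
    cases hd : Nat.toDigits 10 n.natAbs with
    | nil => exact absurd hd (by have := Nat.length_toDigits_pos (b := 10) (n := n.natAbs); intro h; simp [h] at this)
    | cons c t =>
      rw [List.getLast?_cons_cons, ← hd, toDigits_getLast? n.natAbs]
  · rename_i hpos
    have ht : n.toNat = n.natAbs := by omega
    rw [ht]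
    exact toDigits_getLast? n.natAbs

-- ---- single-char int() and parity, by 10-way case analysis ----
theorem ofChars?_digitChar (r : Nat) (h : r < 10) :
    PySem.Int.ofChars? [Nat.digitChar r] = some (r : Int) := by
  interval_cases r <;> decide

theorem parity_char (r : Nat) (h : r < 10) :
    (if PySem.Int.mod ((PySem.Int.ofChars? [Nat.digitChar r]).getD 0) 2 == 0 then true else false)
      = decide (r % 2 = 0) := by
  interval_cases r <;> decide

-- ---- int(s) on an all-digit string is nonnegative (if it parses) ----
theorem isDigit_ne_chars {c : Char} (h : c.isDigit = true) :
    PySem.Int.isIntSpace c = false ∧ c ≠ '-' ∧ c ≠ '+' := by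
  refine ⟨?_, ?_, ?_⟩
  · by_contra hs
    simp only [Bool.not_eq_false, PySem.Int.isIntSpace, Bool.or_eq_true, decide_eq_true_eq] at hs
    rcases hs with (((((rfl | rfl) | rfl) | rfl) | rfl) | rfl) <;> exact absurd h (by decide)
  · rintro rfl; exact absurd h (by decide)
  · rintro rfl; exact absurd h (by decide)

theorem dropWhile_space_of_digits (cs : List Char) (h : ∀ c ∈ cs, c.isDigit = true) :
    cs.dropWhile PySem.Int.isIntSpace = cs := by
  cases cs with
  | nil => rfl
  | cons c t =>
    rw [List.dropWhile_cons_of_neg]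
    simp [(isDigit_ne_chars (h c List.mem_cons_self)).1]

theorem ofChars?_digits_nonneg (cs : List Char) (h : ∀ c ∈ cs, c.isDigit = true)
    (v : Int) (hv : PySem.Int.ofChars? cs = some v) : 0 ≤ v := by
  have hrev : ∀ c ∈ cs.reverse, c.isDigit = true := by
    intro c hc; exact h c (List.mem_reverse.mp hc)
  simp only [PySem.Int.ofChars?, dropWhile_space_of_digits cs h,
    dropWhile_space_of_digits cs.reverse hrev, List.reverse_reverse] at hv
  split at hv
  · exact absurd (h '-' List.mem_cons_self) (by decide)
  · exact absurd (h '+' List.mem_cons_self) (by decide)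
  · simp only [Option.map_eq_some_iff, bind, Option.bind_eq_some_iff,
      Option.pure_def, Option.some.injEq] at hv
    obtain ⟨m, ⟨a, _, ha⟩, hm⟩ := hv
    subst hm
    rw [← ha]
    exact Int.natCast_nonneg a

-- ---- Python floor-mod / floor-div on the values the proof meets ----
theorem pymod_ten (m : Nat) : PySem.Int.mod (m : Int) 10 = ((m % 10 : Nat) : Int) := by
  unfold PySem.Int.mod
  rw [Int.fmod_eq_emod, if_pos (Or.inl (by norm_num))]
  omega

theorem pymod_two (m : Nat) : PySem.Int.mod (m : Int) 2 = ((m % 2 : Nat) : Int) := by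
  unfold PySem.Int.mod
  rw [Int.fmod_eq_emod, if_pos (Or.inl (by norm_num))]
  omega

theorem pydiv_ten (m : Nat) : PySem.Int.floordiv (m : Int) 10 = ((m / 10 : Nat) : Int) := by
  unfold PySem.Int.floordiv
  rw [Int.fdiv_eq_ediv, if_pos (Or.inl (by norm_num))]
  omega

theorem mod_eq_zero_of_dvd (n : Int) (h : (10 : Int) ∣ n) : PySem.Int.mod n 10 = 0 := by
  unfold PySem.Int.mod
  rw [Int.fmod_eq_emod, if_pos (Or.inr h), Int.emod_eq_zero_of_dvd h]; ring

-- ---- core: B's divmod loop computes A's "no even digit in str(s)" test ----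
theorem altDigitsLoop_eq (fuel k : Nat) (hk : k < fuel) :
    altDigitsLoop fuel (k : Int)
      = (if ((Nat.toDigits 10 k).map
            (fun i => if PySem.Int.mod ((PySem.Int.ofChars? [i]).getD 0) 2 == 0 then true else false)).any id
         then false else true) := by
  induction fuel generalizing k with
  | zero => omega
  | succ fuel ih =>
    rw [altDigitsLoop]
    simp only [pydiv_ten, pymod_ten, pymod_two]
    rcases Nat.lt_or_ge k 10 with h10 | h10
    · have hm : k % 10 = k := Nat.mod_eq_of_lt h10
      have hd : k / 10 = 0 := Nat.div_eq_of_lt h10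
      rw [Nat.toDigits_of_lt_base h10, List.map_cons, List.map_nil, parity_char k h10]
      simp only [hm, hd, Nat.cast_zero]
      by_cases hp : k % 2 = 0
      · simp [hp]
      · simp [hp]
        omega
    · rw [Nat.toDigits_eq_if (by norm_num), if_neg (show ¬ k < 10 by omega), List.map_append,
        List.any_append, List.map_cons, List.map_nil,
        parity_char (k % 10) (Nat.mod_lt _ (by norm_num))]
      have hq0 : k / 10 ≠ 0 := by omega
      have hqlt : k / 10 < fuel := by
        have : k / 10 < k := Nat.div_lt_self (by omega) (by norm_num)
        omega
      by_cases hp : k % 10 % 2 = 0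
      · simp [hp]
      · rw [ih (k / 10) hqlt]
        simp only [hp, decide_false, List.any_cons, List.any_nil, id, Bool.or_false]
        have hodd : ¬ (2 ∣ (k : Int)) := by omega
        have hq : ¬ ((k : Int) / 10 = 0) := by omega
        simp [hodd, hq]

-- ===== VERDICT (by name: the statement is the Claim_ definition above) =====
theorem reversible_spec : Claim_equal_reversible := by
  intro n _ hpre
  unfold Spec_reversible reversible reversible_alt
  dsimp only
  by_cases h10 : (10 : Int) ∣ n
  · -- last digit 0: both return False
    have hlast : (PySem.Int.toChars n).getLast? = some '0' := by
      rw [toChars_getLast? n]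
      have : n.natAbs % 10 = 0 := by
        have : (10 : Nat) ∣ n.natAbs := Int.natAbs_dvd_natAbs.mpr h10
        omega
      rw [this]; rfl
    rw [PySem.List.pyGet?_neg_one, hlast, mod_eq_zero_of_dvd n h10]
    dsimp only
    rw [show PySem.Int.ofChars? ['0'] = some 0 from by decide]
    simp
  · -- 0 ≤ n, last digit nonzero
    have h0 : 0 ≤ n := hpre.resolve_right h10
    obtain ⟨m, rfl⟩ : ∃ m : Nat, n = (m : Int) := ⟨n.toNat, by omega⟩
    have hmd : m % 10 ≠ 0 := by
      intro hz
      exact h10 (Int.natCast_dvd_natCast.mpr (Nat.dvd_of_mod_eq_zero hz))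
    have hlast : (PySem.Int.toChars (m : Int)).getLast? = some (Nat.digitChar (m % 10)) := by
      rw [toChars_getLast?, Int.natAbs_natCast]
    rw [PySem.List.pyGet?_neg_one, hlast]
    dsimp only
    rw [ofChars?_digitChar (m % 10) (Nat.mod_lt _ (by norm_num))]
    dsimp only
    have hAguard : (((m % 10 : Nat) : Int) == 0) = false := by
      simp only [beq_eq_false_iff_ne, ne_eq, Int.natCast_eq_zero]
      exact hmd
    have hBguard : (PySem.Int.mod (m : Int) 10 == 0) = false := by
      rw [pymod_ten]; exact hAguard
    rw [hAguard, hBguard]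
    simp only [Bool.false_eq_true, if_false]
    -- both now parse int(d) and int(d[::-1]); the results are shared expressions
    have hdig : ∀ c ∈ PySem.Int.toChars (m : Int), c.isDigit = true := by
      intro c hc
      apply toDigits_all_isDigit m
      unfold PySem.Int.toChars at hc
      rw [if_neg (by omega)] at hc
      simpa using hc
    cases h1 : PySem.Int.ofChars? (PySem.Int.toChars (m : Int)) with
    | none => rfl
    | some a =>
      cases h2 : PySem.Int.ofChars?
          ((PySem.List.slice? (PySem.Int.toChars (m : Int)) none none (-1)).getD []) with
      | none => rfl
      | some b =>
        dsimp only
        have ha : 0 ≤ a := ofChars?_digits_nonneg _ hdig a h1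
        have hb : 0 ≤ b := by
          refine ofChars?_digits_nonneg _ ?_ b h2
          intro c hc
          rw [PySem.List.slice?_none_none_neg_one] at hc
          exact hdig c (List.mem_reverse.mp (by simpa using hc))
        obtain ⟨k, hab⟩ : ∃ k : Nat, a + b = (k : Int) := ⟨(a + b).toNat, by omega⟩
        rw [hab]
        have hchars : PySem.Int.toChars (k : Int) = Nat.toDigits 10 k := by
          unfold PySem.Int.toChars
          rw [if_neg (by omega)]
          simp
        rw [hchars, Int.natAbs_natCast, altDigitsLoop_eq (k + 1) k (by omega)]
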